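-- pv_equiv track=rewrite | github.com/psoulos/sdtm | preprocessing/preprocess_scan.py | build_in_order_tree
-- ===== SOURCE A (Python) =====
-- def build_in_order_tree(strings, depth=0):
--     """
--     This function builds a tree with the given strings using in-order traversal.
--     """
--     if len(strings) == 1 and depth == 0:
--         return f'( {strings[0]} )'
--
--     if not strings:
--         return None
--
--     mid = len(strings) // 2
--     root = strings[mid]
--
--     left = build_in_order_tree(strings[:mid], depth=depth+1)
--     right = build_in_order_tree(strings[mid + 1:], depth=depth+1)
--
--     output = None
--     if root is None:
--         output = None
--     elif left is None:
--         output = f'{root}'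
--     elif right is None:
--         output = f'( {root} {left} )'
--     else:
--         output = f'( {root} {left} {right} )'
--
--     return output
-- ===== SOURCE B (Python) =====
-- def build_in_order_tree(strings, depth=0):
--     """
--     Iterative re-implementation: an explicit post-order stack over half-open
--     index ranges with a memo of rendered subtrees, instead of recursive calls
--     on list slices.
--     """
--     results = {}
--     stack = [(0, len(strings), depth, False)]
--     while stack:
--         lo, hi, d, ready = stack.pop()
--         if ready:
--             mid = lo + (hi - lo) // 2
--             root = strings[mid]
--             left = results[(lo, mid)]
--             right = results[(mid + 1, hi)]
--             if left is None:
--                 results[(lo, hi)] = root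
--             elif right is None:
--                 results[(lo, hi)] = f'( {root} {left} )'
--             else:
--                 results[(lo, hi)] = f'( {root} {left} {right} )'
--         elif hi - lo == 1 and d == 0:
--             results[(lo, hi)] = f'( {strings[lo]} )'
--         elif hi == lo:
--             results[(lo, hi)] = None
--         else:
--             mid = lo + (hi - lo) // 2
--             stack.append((lo, hi, d, True))
--             stack.append((lo, mid, d + 1, False))
--             stack.append((mid + 1, hi, d + 1, False))
--     return results[(0, len(strings))]
-- ===== Notes on version B (the rewrite author's own statement) =====
-- stated objective: alternative
-- what changed: Replaced the divide-and-conquer recursion on list slices by an explicit post-order stack of half-open index ranges with a memo of rendered subtrees; no slicing, the loop combines stored child results.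
import Mathlib
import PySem

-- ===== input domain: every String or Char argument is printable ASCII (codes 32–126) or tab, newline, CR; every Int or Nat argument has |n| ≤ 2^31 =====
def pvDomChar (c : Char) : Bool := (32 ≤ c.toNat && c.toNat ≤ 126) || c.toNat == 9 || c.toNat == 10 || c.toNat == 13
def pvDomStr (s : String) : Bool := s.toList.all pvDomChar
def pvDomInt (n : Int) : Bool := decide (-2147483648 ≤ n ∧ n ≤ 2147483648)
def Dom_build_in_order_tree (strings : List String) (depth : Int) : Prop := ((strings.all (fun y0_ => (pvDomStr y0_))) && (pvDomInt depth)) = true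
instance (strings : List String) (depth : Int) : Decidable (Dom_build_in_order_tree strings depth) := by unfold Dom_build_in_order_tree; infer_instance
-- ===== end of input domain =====

-- B replaces A's recursion on list slices by an explicit post-order stack over
-- half-open index ranges with a memo of rendered subtrees (objective: alternative decomposition).

-- ===== PORT A =====
-- Literal port of the recursion; strings[:mid] / strings[mid+1:] with 0 ≤ mid ≤ len are
-- exactly take/drop; strings[mid] with mid < len is exactly getD.
def build_in_order_tree (strings : List String) (depth : Int) : Option String :=
  if strings.length = 1 ∧ depth = 0 then
    some ("( " ++ strings.getD 0 "" ++ " )")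
  else if strings = [] then
    none
  else
    let mid := strings.length / 2
    let root := strings.getD mid ""
    let left := build_in_order_tree (strings.take mid) (depth + 1)
    let right := build_in_order_tree (strings.drop (mid + 1)) (depth + 1)
    -- root is a string, never None, so A's 'root is None' branch is unreachable
    match left with
    | none => some root
    | some l =>
      match right with
      | none => some ("( " ++ root ++ " " ++ l ++ " )")
      | some r => some ("( " ++ root ++ " " ++ l ++ " " ++ r ++ " )")
termination_by strings.length
decreasing_by
  all_goals
    have hne : strings.length ≠ 0 := by simp_all
    simp [List.length_take]
    omega

-- ===== PORT B =====
-- the while-stack loop of Source B; each frame is (lo, hi, depth, ready)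
def pvRunStack (strings : List String) (frames : List (Nat × Nat × Int × Bool))
    (results : PySem.Dict (Nat × Nat) (Option String)) : PySem.Dict (Nat × Nat) (Option String) :=
  match frames with
  | [] => results
  | (lo, hi, d, ready) :: rest =>
    if ready then
      let mid := lo + (hi - lo) / 2
      let root := strings.getD mid ""
      let left := results.getD (lo, mid) none
      let right := results.getD (mid + 1, hi) none
      match left with
      | none => pvRunStack strings rest (results.insert (lo, hi) (some root))
      | some l =>
        match right with
        | none => pvRunStack strings rest (results.insert (lo, hi) (some ("( " ++ root ++ " " ++ l ++ " )")))
        | some r => pvRunStack strings rest (results.insert (lo, hi) (some ("( " ++ root ++ " " ++ l ++ " " ++ r ++ " )")))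
    else if hi - lo = 1 ∧ d = 0 then
      pvRunStack strings rest (results.insert (lo, hi) (some ("( " ++ strings.getD lo "" ++ " )")))
    else if hi ≤ lo then  -- Python tests hi == lo; hi < lo never occurs on any reachable frame
      pvRunStack strings rest (results.insert (lo, hi) none)
    else
      let mid := lo + (hi - lo) / 2
      pvRunStack strings ((mid + 1, hi, d + 1, false) :: (lo, mid, d + 1, false) :: (lo, hi, d, true) :: rest) results
termination_by (frames.map (fun f => if f.2.2.2 then 1 else 3 * (f.2.1 - f.1) + 1)).sum
decreasing_by all_goals (simp_all <;> omega)

def build_in_order_tree_alt (strings : List String) (depth : Int) : Option String :=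
  let results := pvRunStack strings [(0, strings.length, depth, false)] PySem.Dict.empty
  results.getD (0, strings.length) none

-- ===== PRECONDITION & SPEC =====
def Spec_build_in_order_tree (strings : List String) (depth : Int) (out : Option String) : Prop := out = build_in_order_tree_alt strings depth
instance (strings : List String) (depth : Int) (out : Option String) : Decidable (Spec_build_in_order_tree strings depth out) := by unfold Spec_build_in_order_tree; infer_instance

-- ===== CLAIM (what is proved, stated in full; the proofs are below) =====
def Claim_equal_build_in_order_tree : Prop := ∀ (strings : List String) (depth : Int), Dom_build_in_order_tree strings depth → Spec_build_in_order_tree strings depth (build_in_order_tree strings depth)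

-- ===== LEMMAS AND PROOFS =====

-- ghost recursion on index ranges: the value A computes for the slice [lo, hi)
def pvG (strings : List String) (lo hi : Nat) (d : Int) : Option String :=
  if hi - lo = 1 ∧ d = 0 then
    some ("( " ++ strings.getD lo "" ++ " )")
  else if hi ≤ lo then
    none
  else
    let mid := lo + (hi - lo) / 2
    let root := strings.getD mid ""
    match pvG strings lo mid (d + 1) with
    | none => some root
    | some l =>
      match pvG strings (mid + 1) hi (d + 1) with
      | none => some ("( " ++ root ++ " " ++ l ++ " )")
      | some r => some ("( " ++ root ++ " " ++ l ++ " " ++ r ++ " )")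
termination_by hi - lo
decreasing_by all_goals omega

-- the memo state after fully processing one not-ready frame (lo, hi, d)
def pvMemoG (strings : List String) (lo hi : Nat) (d : Int)
    (m : PySem.Dict (Nat × Nat) (Option String)) : PySem.Dict (Nat × Nat) (Option String) :=
  if hi - lo = 1 ∧ d = 0 then
    m.insert (lo, hi) (pvG strings lo hi d)
  else if hi ≤ lo then
    m.insert (lo, hi) none
  else
    let mid := lo + (hi - lo) / 2
    let m2 := pvMemoG strings (mid + 1) hi (d + 1) m
    let m1 := pvMemoG strings lo mid (d + 1) m2
    m1.insert (lo, hi) (pvG strings lo hi d)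
termination_by hi - lo
decreasing_by all_goals omega

theorem pvMemoG_getD_preserve (strings : List String) (lo hi : Nat) (d : Int)
    (m : PySem.Dict (Nat × Nat) (Option String)) (a b : Nat)
    (h : ¬ (lo ≤ a ∧ b ≤ hi)) :
    (pvMemoG strings lo hi d m).getD (a, b) none = m.getD (a, b) none := by
  have hne : ((a, b) : Nat × Nat) ≠ (lo, hi) := by
    intro he; apply h; cases he; exact ⟨le_rfl, le_rfl⟩
  unfold pvMemoG
  split_ifs with h1 h2
  · rw [PySem.Dict.getD_insert]; simp [hne]
  · rw [PySem.Dict.getD_insert]; simp [hne]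
  · rw [PySem.Dict.getD_insert]
    simp only [hne, if_false]
    rw [pvMemoG_getD_preserve strings lo _ _ _ a b (by omega),
        pvMemoG_getD_preserve strings _ hi _ _ a b (by omega)]
termination_by hi - lo
decreasing_by all_goals omega

theorem pvMemoG_getD_self (strings : List String) (lo hi : Nat) (d : Int)
    (m : PySem.Dict (Nat × Nat) (Option String)) :
    (pvMemoG strings lo hi d m).getD (lo, hi) none = pvG strings lo hi d := by
  unfold pvMemoG
  split_ifs with h1 h2
  · rw [PySem.Dict.getD_insert_self]
  · rw [PySem.Dict.getD_insert_self]
    unfold pvG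
    rw [if_neg h1, if_pos h2]
  · rw [PySem.Dict.getD_insert_self]

theorem pvRunStack_cons (strings : List String) (lo hi : Nat) (d : Int)
    (rest : List (Nat × Nat × Int × Bool)) (m : PySem.Dict (Nat × Nat) (Option String)) :
    pvRunStack strings ((lo, hi, d, false) :: rest) m
      = pvRunStack strings rest (pvMemoG strings lo hi d m) := by
  rw [pvRunStack]
  simp only [Bool.false_eq_true, if_false]
  unfold pvMemoG
  split_ifs with h1 h2
  · unfold pvG; rw [if_pos h1]
  · rfl
  · have hmidlt : lo + (hi - lo) / 2 < hi := by omega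
    have hmidge : lo ≤ lo + (hi - lo) / 2 := by omega
    rw [pvRunStack_cons strings _ hi _ _ m,
        pvRunStack_cons strings lo _ _ _ _]
    rw [pvRunStack]
    simp only [if_true]
    rw [pvMemoG_getD_self strings lo _ _ _,
        pvMemoG_getD_preserve strings lo _ _ _ _ _ (by omega),
        pvMemoG_getD_self strings _ hi _ _]
    conv_rhs => rw [pvG]
    rw [if_neg h1, if_neg (by omega)]
    rcases hG1 : pvG strings lo (lo + (hi - lo) / 2) (d + 1) with _ | l <;>
      rcases hG2 : pvG strings (lo + (hi - lo) / 2 + 1) hi (d + 1) with _ | r <;>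
      simp only [hG1, hG2]
termination_by hi - lo
decreasing_by all_goals omega

theorem pvG_eq_A (strings : List String) (lo hi : Nat) (d : Int)
    (hhi : hi ≤ strings.length) (hlo : lo ≤ hi) :
    build_in_order_tree ((strings.drop lo).take (hi - lo)) d = pvG strings lo hi d := by
  have hlen : ((strings.drop lo).take (hi - lo)).length = hi - lo := by
    simp [List.length_take, List.length_drop]; omega
  have hgetD : ∀ i : Nat, i < hi - lo →
      ((strings.drop lo).take (hi - lo)).getD i "" = strings.getD (lo + i) "" := by
    intro i hi2
    rw [List.getD_eq_getElem?_getD, List.getD_eq_getElem?_getD, List.getElem?_take_of_lt hi2,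
        List.getElem?_drop]
  rw [build_in_order_tree, pvG]
  by_cases h1 : hi - lo = 1 ∧ d = 0
  · rw [if_pos ⟨by omega, h1.2⟩, if_pos h1, hgetD 0 (by omega), Nat.add_zero]
  · rw [if_neg (by omega), if_neg h1]
    by_cases h2 : hi ≤ lo
    · rw [if_pos (by rw [List.eq_nil_iff_length_eq_zero]; omega), if_pos h2]
    · rw [if_neg (by simp [List.eq_nil_iff_length_eq_zero]; omega), if_neg h2]
      simp only [hlen]
      have htake : ((strings.drop lo).take (hi - lo)).take ((hi - lo) / 2)
          = (strings.drop lo).take ((lo + (hi - lo) / 2) - lo) := by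
        rw [List.take_take]; congr 1; omega
      have hdrop : ((strings.drop lo).take (hi - lo)).drop ((hi - lo) / 2 + 1)
          = (strings.drop (lo + (hi - lo) / 2 + 1)).take (hi - (lo + (hi - lo) / 2 + 1)) := by
        rw [List.drop_take, List.drop_drop]; congr 1; omega
      rw [htake, hdrop, hgetD ((hi - lo) / 2) (by omega),
          pvG_eq_A strings lo (lo + (hi - lo) / 2) (d + 1) (by omega) (by omega),
          pvG_eq_A strings (lo + (hi - lo) / 2 + 1) hi (d + 1) (by omega) (by omega)]
termination_by hi - lo
decreasing_by all_goals omega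

-- ===== VERDICT (by name: the statement is the Claim_ definition above) =====
theorem build_in_order_tree_spec : Claim_equal_build_in_order_tree := by
  intro strings depth _
  unfold Spec_build_in_order_tree build_in_order_tree_alt
  rw [pvRunStack_cons, pvRunStack, pvMemoG_getD_self, ← pvG_eq_A strings 0 strings.length depth le_rfl (Nat.zero_le _)]
  simp
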